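-- pv_equiv track=rewrite | github.com/petervn9/English-for-To | OpitonB_000_Main_final.py | _abs_to_index
-- ===== SOURCE A (Python) =====
-- def _abs_to_index(abspos: int, full_text: str) -> str:
--     lines = full_text.split("\n")
--     acc = 0
--     for line_no, line_text in enumerate(lines, start=1):
--         if acc + len(line_text) >= abspos:
--             return f"{line_no}.{abspos - acc}"
--         acc += len(line_text) + 1
--     last_line = len(lines)
--     last_col = len(lines[-1]) if lines else 0
--     return f"{last_line}.{last_col}"
-- ===== SOURCE B (Python) =====
-- def _abs_to_index(abspos: int, full_text: str) -> str:
--     line = 1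
--     col = 0
--     for ch in full_text[:abspos]:
--         if ch == "\n":
--             line += 1
--             col = 0
--         else:
--             col += 1
--     return f"{line}.{col}"
-- ===== Notes on version B (the rewrite author's own statement) =====
-- stated objective: simpler
-- what changed: B replaces A's split-into-lines loop with accumulator, enumerate bookkeeping and separate end-of-text fallback by a single fold over the clamped prefix full_text[:abspos] that counts newlines and the characters since the last one.
-- outside the precondition, e.g. on _abs_to_index(-3, 'ab'): A returns '1.-3', B returns '1.0'; on _abs_to_index(-1, 'ab\ncd'): A returns '1.-1', B returns '2.1'
import Mathlib
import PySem

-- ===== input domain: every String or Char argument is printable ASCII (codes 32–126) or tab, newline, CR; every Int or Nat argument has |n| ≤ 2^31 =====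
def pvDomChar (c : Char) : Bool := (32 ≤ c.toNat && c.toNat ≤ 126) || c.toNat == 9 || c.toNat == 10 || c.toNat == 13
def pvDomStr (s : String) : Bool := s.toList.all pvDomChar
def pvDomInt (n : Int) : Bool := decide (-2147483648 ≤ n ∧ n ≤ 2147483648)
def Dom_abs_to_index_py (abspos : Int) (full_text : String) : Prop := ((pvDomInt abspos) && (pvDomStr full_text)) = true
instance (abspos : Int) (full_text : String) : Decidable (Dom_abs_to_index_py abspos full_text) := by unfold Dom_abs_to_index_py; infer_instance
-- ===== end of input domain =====

-- ===== PORT A =====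
-- B re-implements the position→"line.column" conversion as one fold over the clamped
-- prefix instead of A's split-into-lines loop with accumulator and fallback (objective: simpler).
-- shared formatting helper: the f-string f"{a}.{b}"
def pvLineStr (a b : Int) : String :=
  PySem.Str.join "" [PySem.Int.toStr a, ".", PySem.Int.toStr b]

-- A's for-loop over enumerate(lines, start=1): `some r` = early return, `none` = loop fell through
def pvLoopA (abspos : Int) : List (Int × List Char) → Int → Option String
  | [], _ => none
  | (lineNo, lineText) :: rest, acc =>
    if abspos ≤ acc + (lineText.length : Int) then some (pvLineStr lineNo (abspos - acc))
    else pvLoopA abspos rest (acc + (lineText.length : Int) + 1)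

def abs_to_index_py (abspos : Int) (full_text : String) : String :=
  -- full_text.split("\n"): the nonempty-separator split, on code points (PySem.Chars.splitOn)
  let lines := PySem.Chars.splitOn full_text.toList ['\n']
  match pvLoopA abspos (PySem.List.enumerate lines 1) 0 with
  | some r => r
  | none =>
    let lastLine : Int := lines.length
    let lastCol : Int :=
      match PySem.List.pyGet? lines (-1) with   -- len(lines[-1]) if lines else 0
      | some l => (l.length : Int)
      | none => 0
    pvLineStr lastLine lastCol

-- ===== PORT B =====
def abs_to_index_py_alt (abspos : Int) (full_text : String) : String :=
  let pfx := PySem.List.slice full_text.toList none (some abspos)   -- full_text[:abspos]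
  let p := pfx.foldl
    (fun (st : Int × Int) ch => if ch = '\n' then (st.1 + 1, 0) else (st.1, st.2 + 1)) (1, 0)
  pvLineStr p.1 p.2

-- ===== PRECONDITION & SPEC =====
-- Pre_ keeps only non-negative abspos: a negative absolute character position is outside the
-- natural domain of this conversion (A happens to report a negative column "1.<abspos>" there).
def Pre_abs_to_index_py (abspos : Int) (full_text : String) : Prop := 0 ≤ abspos
instance (abspos : Int) (full_text : String) : Decidable (Pre_abs_to_index_py abspos full_text) := by unfold Pre_abs_to_index_py; infer_instance
def pvWitness_abs_to_index_py : Int × String := (5, "ab\ncd\nef")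
def Spec_abs_to_index_py (abspos : Int) (full_text : String) (out : String) : Prop := out = abs_to_index_py_alt abspos full_text
instance (abspos : Int) (full_text : String) (out : String) : Decidable (Spec_abs_to_index_py abspos full_text out) := by unfold Spec_abs_to_index_py; infer_instance

-- ===== CLAIM (what is proved, stated in full; the proofs are below) =====
def Claim_equal_abs_to_index_py : Prop := ∀ (abspos : Int) (full_text : String), Dom_abs_to_index_py abspos full_text → Pre_abs_to_index_py abspos full_text → Spec_abs_to_index_py abspos full_text (abs_to_index_py abspos full_text)

-- ===== LEMMAS AND PROOFS =====

def split1 : List Char → List Char × List (List Char)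
  | [] => ([], [])
  | c :: cs =>
    let p := split1 cs
    if c = '\n' then ([], p.1 :: p.2) else (c :: p.1, p.2)

theorem splitOn_go_eq : ∀ (l : List Char) (fuel : Nat) (cur : List Char) (acc : List (List Char)),
    l.length < fuel →
    PySem.Chars.splitOn.go ['\n'] fuel l cur acc
      = acc.reverse ++ ((cur.reverse ++ (split1 l).1) :: (split1 l).2) := by
  intro l
  induction l with
  | nil =>
    intro fuel cur acc h
    cases fuel with
    | zero => omega
    | succ f => simp [PySem.Chars.splitOn.go, split1]
  | cons c rest ih =>
    intro fuel cur acc h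
    cases fuel with
    | zero => simp at h
    | succ f =>
      rw [PySem.Chars.splitOn.go.eq_def]
      simp only []
      by_cases hc : c = '\n'
      · subst hc
        have hpre : List.isPrefixOf ['\n'] ('\n' :: rest) = true := by simp [List.isPrefixOf]
        simp only [hpre, if_pos, List.length_cons, List.drop_succ_cons, List.length_nil, List.drop_zero]
        rw [ih f [] _ (by simpa using h)]
        simp [split1]
      · have hpre : List.isPrefixOf ['\n'] (c :: rest) = false := by
          simp [List.isPrefixOf]
          exact fun he => hc he.symm
        simp only [hpre, Bool.false_eq_true, if_false]
        rw [ih f (c :: cur) acc (by simpa using h)]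
        simp [split1, hc]

theorem splitOn_eq (cs : List Char) :
    PySem.Chars.splitOn cs ['\n'] = (split1 cs).1 :: (split1 cs).2 := by
  unfold PySem.Chars.splitOn
  rw [splitOn_go_eq _ _ _ _ (by omega)]
  simp

def pairL : List Nat → Int → Int × Int
  | [], _ => (0, 0)
  | k :: rest, n =>
    if n ≤ (k : Int) then (1, n)
    else
      match rest with
      | [] => (1, (k : Int))
      | r :: rs => ((pairL (r :: rs) (n - k - 1)).1 + 1, (pairL (r :: rs) (n - k - 1)).2)

def pvStep (st : Int × Int) (ch : Char) : Int × Int :=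
  if ch = '\n' then (st.1 + 1, 0) else (st.1, st.2 + 1)

theorem foldl_pvStep_shift : ∀ (xs : List Char) (L C : Int),
    xs.foldl pvStep (L + 1, C) = ((xs.foldl pvStep (L, C)).1 + 1, (xs.foldl pvStep (L, C)).2) := by
  intro xs
  induction xs with
  | nil => intro L C; simp
  | cons c rest ih =>
    intro L C
    by_cases hc : c = '\n' <;> simp [List.foldl_cons, pvStep, hc, ih]

theorem main_fold_pairL : ∀ (cs : List Char) (m C : Nat),
    (cs.take m).foldl pvStep (1, (C : Int))
      = pairL ((C + (split1 cs).1.length) :: (split1 cs).2.map List.length) ((C : Int) + m) := by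
  intro cs
  induction cs with
  | nil =>
    intro m C
    cases m <;> simp only [split1, List.take_nil, List.foldl_nil, List.map_nil] <;>
      rw [pairL.eq_def] <;> simp
  | cons c rest ih =>
    intro m C
    cases m with
    | zero =>
      simp only [List.take_zero, List.foldl_nil, Nat.cast_zero, add_zero]
      rw [pairL.eq_def]
      simp only []
      rw [if_pos (by push_cast; omega)]
    | succ k =>
      by_cases hc : c = '\n'
      · subst hc
        simp only [split1, List.take_succ_cons, List.foldl_cons, pvStep, reduceIte]
        rw [foldl_pvStep_shift]
        have hih := ih k 0
        simp only [Nat.cast_zero, zero_add] at hih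
        rw [hih]
        conv_rhs => rw [pairL.eq_def]
        simp only [List.map_cons, List.length_nil, Nat.add_zero]
        rw [if_neg (by push_cast; omega)]
        have h2 : (C : Int) + (↑(k + 1) : Int) - C - 1 = (k : Int) := by push_cast; omega
        rw [h2]
      · simp only [split1, if_neg hc, List.take_succ_cons, List.foldl_cons, pvStep]
        rw [show ((1:Int), (C:Int) + 1) = ((1:Int), ((C+1 : Nat) : Int)) by push_cast; rfl]
        rw [ih k (C + 1)]
        have h1 : C + ((split1 rest).1.length + 1) = (C + 1) + (split1 rest).1.length := by omega
        have h2 : (C : Int) + (k + 1) = ((C + 1 : Nat) : Int) + k := by push_cast; omega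
        simp only [List.length_cons]
        rw [h1]
        congr 1
        push_cast
        ring

theorem loopA_eq (abspos : Int) : ∀ (ls : List (List Char)) (l : List Char) (s acc : Int),
    (match pvLoopA abspos (PySem.List.enumerate (l :: ls) s) acc with
     | some r => r
     | none => pvLineStr (s - 1 + ((l :: ls).length : Int)) ((ls.getLastD l).length : Int))
    = pvLineStr (s - 1 + (pairL ((l :: ls).map List.length) (abspos - acc)).1)
        ((pairL ((l :: ls).map List.length) (abspos - acc)).2) := by
  intro ls
  induction ls with
  | nil =>
    intro l s acc
    rw [PySem.List.enumerate_cons, PySem.List.enumerate_nil, pvLoopA.eq_def]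
    simp only [List.map_cons, List.map_nil]
    conv_rhs => rw [pairL.eq_def]
    simp only []
    by_cases hle : abspos ≤ acc + (l.length : Int)
    · rw [if_pos hle, if_pos (show abspos - acc ≤ (l.length : Int) by omega)]
      simp only []
      congr 1
      omega
    · rw [if_neg hle, if_neg (show ¬ abspos - acc ≤ (l.length : Int) by omega)]
      simp only [pvLoopA, List.length_cons, List.length_nil, List.getLastD]
      congr 1
  | cons l2 ls ih =>
    intro l s acc
    have hih := ih l2 (s + 1) (acc + (l.length : Int) + 1)
    rw [show abspos - (acc + (l.length : Int) + 1) = abspos - acc - l.length - 1 by omega] at hih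
    rw [PySem.List.enumerate_cons, pvLoopA.eq_def]
    simp only [List.map_cons]
    conv_rhs => rw [pairL.eq_def]
    simp only []
    by_cases hle : abspos ≤ acc + (l.length : Int)
    · rw [if_pos hle, if_pos (show abspos - acc ≤ (l.length : Int) by omega)]
      simp only []
      congr 1
      omega
    · rw [if_neg hle, if_neg (show ¬ abspos - acc ≤ (l.length : Int) by omega)]
      cases hX : pvLoopA abspos (PySem.List.enumerate (l2 :: ls) (s + 1)) (acc + (l.length : Int) + 1) with
      | some r =>
        rw [hX] at hih
        simp only [List.map_cons] at hih
        rw [hih]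
        simp only []
        congr 1
        omega
      | none =>
        rw [hX] at hih
        simp only [List.map_cons] at hih
        simp only [List.getLastD_cons]
        rw [show s - 1 + (((l :: l2 :: ls).length : Nat) : Int) = s + 1 - 1 + (((l2 :: ls).length : Nat) : Int) by simp]
        rw [hih]
        congr 1
        omega


theorem pyGet?_cons_neg_one {α : Type} (l : α) (ls : List α) :
    PySem.List.pyGet? (l :: ls) (-1) = some (ls.getLastD l) := by
  unfold PySem.List.pyGet? PySem.List.pyIdx?
  rw [if_neg (by omega), if_pos (by simp)]
  simp only [Option.bind]
  have h1 : (-(-1 : Int)).toNat = 1 := by decide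
  rw [h1]
  have h2 : (l :: ls).length - 1 = ls.length := by simp
  rw [h2]
  rw [show (l :: ls)[ls.length]? = (l :: ls).getLast? by
    rw [List.getLast?_eq_getElem?]; simp]
  rw [List.getLastD_eq_getLast?]
  cases h : (l :: ls).getLast? with
  | some x => simp [List.getLast?_cons] at h ⊢; exact h.symm ▸ rfl
  | none => simp at h

-- ===== VERDICT (by name: the statement is the Claim_ definition above) =====
theorem abs_to_index_py_spec : Claim_equal_abs_to_index_py := by
  intro abspos full_text _dom hpre
  unfold Pre_abs_to_index_py at hpre
  unfold Spec_abs_to_index_py abs_to_index_py abs_to_index_py_alt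
  dsimp only
  rw [splitOn_eq, PySem.List.slice_to _ hpre]
  have hB : List.foldl
      (fun (st : Int × Int) ch => if ch = '\n' then (st.1 + 1, 0) else (st.1, st.2 + 1)) (1, 0)
      (List.take abspos.toNat full_text.toList)
      = pairL (((split1 full_text.toList).1.length) ::
          (split1 full_text.toList).2.map List.length) abspos := by
    have h := main_fold_pairL full_text.toList abspos.toNat 0
    simp only [Nat.cast_zero, zero_add] at h
    rw [Int.toNat_of_nonneg hpre] at h
    exact h
  have hA := loopA_eq abspos (split1 full_text.toList).2 (split1 full_text.toList).1 1 0
  simp only [sub_self, zero_add, sub_zero, List.map_cons] at hA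
  rw [pyGet?_cons_neg_one]
  simp only []
  rw [hA, hB]
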